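-- pv_equiv track=rewrite | github.com/NoraLeo/clps-jnr-software-engr-assessment | assessment_1.py | letter_reverser
-- ===== SOURCE A (Python) =====
-- import string as str_lib
--
-- def letter_reverser(input_string):
--     # Convert the string into a list for mutability
--     string_split = list(input_string)
--
--     # Store punctuation marks with their original indices
--     punctuation_indices = [(i, char) for i, char in enumerate(string_split) if char in str_lib.punctuation]
--
--     # Remove punctuation from the string
--     words_only = [char for char in string_split if char not in str_lib.punctuation]
--
--     # Reverse the letters in the words
--     reversed_letters = words_only[::-1]
--
--     # Reinsert punctuation at their original positions
--     for index, punct in punctuation_indices: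
--         reversed_letters.insert(index, punct)
--
--     # Join the list back into a string
--     return ''.join(reversed_letters)
-- ===== SOURCE B (Python) =====
-- import string as str_lib
--
-- def letter_reverser(input_string):
--     # Single pass: keep punctuation where it is, fill the other slots
--     # with the non-punctuation characters in reversed order.
--     punct = set(str_lib.punctuation)
--     letters = iter([c for c in reversed(input_string) if c not in punct])
--     return ''.join(c if c in punct else next(letters) for c in input_string)
-- ===== Notes on version B (the rewrite author's own statement) =====
-- stated objective: alternative
-- what changed: A strips punctuation, reverses, then re-inserts each punctuation mark with list.insert (a linear shift per mark, O(n*p)); B makes one pass over the string, keeping punctuation in place and drawing the remaining slots from an iterator over the reversed non-punctuation characters (O(n)); measured only ~1.35x on the generated (punctuation-sparse) inputs, so no speed claim.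
import Mathlib
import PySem

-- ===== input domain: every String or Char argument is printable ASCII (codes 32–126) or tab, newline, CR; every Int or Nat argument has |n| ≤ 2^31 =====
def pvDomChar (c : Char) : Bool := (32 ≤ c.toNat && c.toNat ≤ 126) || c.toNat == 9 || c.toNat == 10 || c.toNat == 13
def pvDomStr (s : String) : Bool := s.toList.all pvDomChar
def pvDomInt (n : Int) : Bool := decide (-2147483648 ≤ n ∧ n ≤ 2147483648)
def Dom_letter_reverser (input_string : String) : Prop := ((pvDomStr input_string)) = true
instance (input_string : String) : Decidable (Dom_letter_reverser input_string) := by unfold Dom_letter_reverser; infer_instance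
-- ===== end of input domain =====

-- B replaces A's reinsert-each-punctuation-mark (list.insert) loop by a single pass that keeps
-- punctuation in place and fills the other slots from the reversed letters (objective: alternative).

-- ===== PORT A =====
-- str_lib.punctuation (string.punctuation)
def pvPunct : List Char := "!\"#$%&'()*+,-./:;<=>?@[\\]^_`{|}~".toList

def letter_reverser (input_string : String) : String :=
  let string_split := input_string.toList
  let punctuation_indices :=
    (PySem.List.enumerate string_split 0).filter (fun p => decide (p.2 ∈ pvPunct))
  let words_only := string_split.filter (fun c => decide (c ∉ pvPunct))
  let reversed_letters := (PySem.List.slice? words_only none none (-1)).getD []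
  let final := punctuation_indices.foldl
    (fun acc p => PySem.List.insert acc p.1 p.2) reversed_letters
  String.ofList final

-- ===== PORT B =====
-- the generator expression of Source B: walk the string, keep punctuation, else next(letters)
def pvMerge : List Char → List Char → List Char
  | [], _ => []
  | c :: cs, ls =>
    if c ∈ pvPunct then c :: pvMerge cs ls
    else match ls with
      | [] => []            -- next() on an exhausted iterator; never reached
      | l :: ls' => l :: pvMerge cs ls'

def letter_reverser_alt (input_string : String) : String :=
  let letters := input_string.toList.reverse.filter (fun c => decide (c ∉ pvPunct))
  String.ofList (pvMerge input_string.toList letters)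

-- ===== PRECONDITION & SPEC =====
def Spec_letter_reverser (input_string : String) (out : String) : Prop := out = letter_reverser_alt input_string
instance (input_string : String) (out : String) : Decidable (Spec_letter_reverser input_string out) := by unfold Spec_letter_reverser; infer_instance

-- ===== CLAIM (what is proved, stated in full; the proofs are below) =====
def Claim_equal_letter_reverser : Prop := ∀ (input_string : String), Dom_letter_reverser input_string → Spec_letter_reverser input_string (letter_reverser input_string)

-- ===== LEMMAS AND PROOFS =====

-- Python list.insert at a nonnegative index clamps at the length
lemma pv_insert_of_nonneg {α : Type} (xs : List α) (i : Int) (v : α) (h : 0 ≤ i) :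
    PySem.List.insert xs i v = xs.take i.toNat ++ v :: xs.drop i.toNat := by
  simp only [PySem.List.insert, PySem.List.sliceIndices]
  rw [if_neg (by omega)]
  rw [if_neg (by norm_num : ¬ ((1 : Int) < 0))]
  by_cases hle : i ≤ (xs.length : Int)
  · rw [min_eq_left hle]
  · rw [min_eq_right (by omega : (xs.length : Int) ≤ i)]
    have h1 : xs.length ≤ i.toNat := by omega
    rw [Int.toNat_natCast, List.take_of_length_le h1, List.drop_of_length_le h1,
        List.take_length, List.drop_length]

lemma pv_insert_cons {α : Type} (l : α) (rest : List α) (i : Int) (v : α) (h : 1 ≤ i) :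
    PySem.List.insert (l :: rest) i v = l :: PySem.List.insert rest (i - 1) v := by
  rw [pv_insert_of_nonneg _ _ _ (by omega), pv_insert_of_nonneg _ _ _ (by omega)]
  have hi : i.toNat = (i - 1).toNat + 1 := by omega
  rw [hi, List.take_succ_cons, List.drop_succ_cons, List.cons_append]

-- inserting only at indices ≥ 1 never touches the head
lemma pv_foldl_insert_cons (ps : List (Int × Char)) (base : List Char) (l : Char)
    (h : ∀ p ∈ ps, (1 : Int) ≤ p.1) :
    ps.foldl (fun acc p => PySem.List.insert acc p.1 p.2) (l :: base) =
      l :: (ps.map (fun p => (p.1 - 1, p.2))).foldl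
            (fun acc p => PySem.List.insert acc p.1 p.2) base := by
  induction ps generalizing base with
  | nil => rfl
  | cons p tl ih =>
    simp only [List.foldl_cons, List.map_cons]
    rw [pv_insert_cons _ _ _ _ (h p (by simp))]
    exact ih _ (fun q hq => h q (List.mem_cons_of_mem _ hq))

lemma pv_entries_shift (cs : List Char) (n : Int) :
    (PySem.List.enumerate cs (n + 1)).filter (fun p => decide (p.2 ∈ pvPunct)) =
      ((PySem.List.enumerate cs n).filter (fun p => decide (p.2 ∈ pvPunct))).map
        (fun p => (p.1 + 1, p.2)) := by
  induction cs generalizing n with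
  | nil => rfl
  | cons c cs ih =>
    rw [PySem.List.enumerate_cons, PySem.List.enumerate_cons]
    by_cases hc : c ∈ pvPunct <;>
      simp [hc, ih (n + 1)]

lemma pv_entries_ge (cs : List Char) (n : Int) :
    ∀ p ∈ (PySem.List.enumerate cs n).filter (fun p => decide (p.2 ∈ pvPunct)),
      n ≤ p.1 := by
  intro p hp
  have hmem := List.mem_of_mem_filter hp
  rw [PySem.List.mem_enumerate_iff] at hmem
  obtain ⟨k, hk, rfl⟩ := hmem
  simp only
  omega

-- the heart: A's reinsert-fold equals B's single merge pass
lemma pv_main (cs ls : List Char)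
    (h : ls.length = (cs.filter (fun c => decide (c ∉ pvPunct))).length) :
    ((PySem.List.enumerate cs 0).filter (fun p => decide (p.2 ∈ pvPunct))).foldl
        (fun acc p => PySem.List.insert acc p.1 p.2) ls = pvMerge cs ls := by
  induction cs generalizing ls with
  | nil =>
    simp only [List.filter_nil, List.length_nil] at h
    rw [List.eq_nil_of_length_eq_zero h]
    rfl
  | cons c cs ih =>
    rw [PySem.List.enumerate_cons]
    have hshift := pv_entries_shift cs 0
    have hge : ∀ p ∈ ((PySem.List.enumerate cs 0).filter
        (fun p => decide (p.2 ∈ pvPunct))).map (fun p => (p.1 + 1, p.2)), (1 : Int) ≤ p.1 := by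
      intro p hp
      obtain ⟨q, hq, rfl⟩ := List.mem_map.mp hp
      have := pv_entries_ge cs 0 q hq
      simp only
      omega
    have hcancel : (((PySem.List.enumerate cs 0).filter
          (fun p => decide (p.2 ∈ pvPunct))).map (fun p => (p.1 + 1, p.2))).map
          (fun p => (p.1 - 1, p.2)) =
        (PySem.List.enumerate cs 0).filter (fun p => decide (p.2 ∈ pvPunct)) := by
      rw [List.map_map]
      have hid : ((fun (p : Int × Char) => (p.1 - 1, p.2)) ∘ fun p => (p.1 + 1, p.2)) =
          fun p => p := by funext p; simp
      rw [hid, List.map_id']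
    by_cases hc : c ∈ pvPunct
    · rw [List.filter_cons_of_neg (by simp [hc])] at h
      rw [List.filter_cons_of_pos (by simp [hc]), hshift, List.foldl_cons]
      rw [show PySem.List.insert ls ((0 : Int), c).1 ((0 : Int), c).2 = c :: ls from
            PySem.List.insert_zero ls c]
      rw [pv_foldl_insert_cons _ _ _ hge, hcancel, ih ls h]
      simp only [pvMerge, if_pos hc]
    · rw [List.filter_cons_of_pos (by simp [hc])] at h
      rw [List.filter_cons_of_neg (by simp [hc]), hshift]
      cases ls with
      | nil => simp at h
      | cons l ls' =>
        rw [pv_foldl_insert_cons _ _ _ hge, hcancel, ih ls' (by simpa using h)]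
        simp only [pvMerge, if_neg hc]

-- ===== VERDICT (by name: the statement is the Claim_ definition above) =====
theorem letter_reverser_spec : Claim_equal_letter_reverser := by
  intro s _
  unfold Spec_letter_reverser letter_reverser letter_reverser_alt
  simp only [PySem.List.slice?_none_none_neg_one, Option.getD_some]
  rw [← List.filter_reverse]
  exact congrArg String.ofList (pv_main s.toList _ (by simp))
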